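-- pv_equiv track=rewrite | github.com/beryl-moza/beryl-vault-backup | PERSONAL/MAILMAN/core/vip_gatekeeper.py | get_deferred_digest
-- ===== SOURCE A (Python) =====
-- def get_deferred_digest(deferred_emails, classifications):
--     """
--     Format deferred emails into a batch digest.
--
--     Args:
--         deferred_emails: List of deferred email dicts
--         classifications: List of classification dicts
--
--     Returns:
--         Formatted digest string
--     """
--     if not deferred_emails:
--         return "No deferred emails."
--
--     lines = [f"DEFERRED EMAIL DIGEST ({len(deferred_emails)} emails)\n" + "=" * 60]
--
--     # Group by priority
--     for priority in ["P3", "P2", "P1"]:  # Already filtered out P0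
--         matching = []
--         for email in deferred_emails:
--             classification = next(
--                 (c for c in classifications if c.get("message_id") == email.get("id")),
--                 {"priority": "P3"},
--             )
--             if classification.get("priority") == priority:
--                 matching.append((email, classification))
--
--         if matching:
--             lines.append(f"\n{priority}:")
--             for email, classification in matching:
--                 sender = email.get("sender_name", email.get("sender_email", "Unknown"))
--                 subject = email.get("subject", "[No subject]")[:50]
--                 summary = classification.get("summary", "")[:60]
--                 lines.append(f"  • {sender}: {subject}")
--                 if summary:
--                     lines.append(f"    → {summary}")
--
--     return "\n".join(lines)
-- ===== SOURCE B (Python) =====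
-- def get_deferred_digest(deferred_emails, classifications):
--     """Priority-grouped digest: one indexing pass, one bucketing pass, one emit pass."""
--     if not deferred_emails:
--         return "No deferred emails."
--
--     # First classification per message_id wins (matches next(...)'s first-match rule).
--     index = {}
--     for c in classifications:
--         index.setdefault(c.get("message_id"), c)
--
--     buckets = {}
--     for email in deferred_emails:
--         c = index.get(email.get("id"), {"priority": "P3"})
--         buckets.setdefault(c.get("priority"), []).append((email, c))
--
--     lines = [f"DEFERRED EMAIL DIGEST ({len(deferred_emails)} emails)\n" + "=" * 60]
--     for priority in ["P3", "P2", "P1"]: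
--         group = buckets.get(priority, [])
--         if group:
--             lines.append(f"\n{priority}:")
--             for email, c in group:
--                 sender = email.get("sender_name", email.get("sender_email", "Unknown"))
--                 subject = email.get("subject", "[No subject]")[:50]
--                 summary = c.get("summary", "")[:60]
--                 lines.append(f"  • {sender}: {subject}")
--                 if summary:
--                     lines.append(f"    → {summary}")
--     return "\n".join(lines)
-- ===== Notes on version B (the rewrite author's own statement) =====
-- stated objective: alternative
-- what changed: Replaces A's three priority-scans (each re-resolving every email's classification with a linear next(...) search) with a message_id->classification dict built once plus a single bucketing pass over the emails, followed by one emit pass over the fixed priority order.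
import Mathlib
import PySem

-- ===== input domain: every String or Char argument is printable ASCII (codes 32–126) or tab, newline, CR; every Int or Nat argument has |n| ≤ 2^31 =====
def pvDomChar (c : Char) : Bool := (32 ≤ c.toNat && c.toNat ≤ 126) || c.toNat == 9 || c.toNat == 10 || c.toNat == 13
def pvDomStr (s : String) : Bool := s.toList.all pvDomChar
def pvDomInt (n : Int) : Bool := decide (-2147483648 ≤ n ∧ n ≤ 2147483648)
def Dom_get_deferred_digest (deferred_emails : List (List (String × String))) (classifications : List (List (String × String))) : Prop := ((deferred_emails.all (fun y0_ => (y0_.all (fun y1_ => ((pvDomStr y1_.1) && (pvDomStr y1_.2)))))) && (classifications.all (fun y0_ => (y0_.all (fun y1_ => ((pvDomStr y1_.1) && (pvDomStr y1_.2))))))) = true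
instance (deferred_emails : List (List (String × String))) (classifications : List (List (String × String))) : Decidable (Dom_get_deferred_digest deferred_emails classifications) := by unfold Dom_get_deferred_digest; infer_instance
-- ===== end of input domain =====

-- B replaces A's three priority-scans (each re-resolving classifications with a linear search)
-- by a message_id→classification index built once plus a single bucketing pass and one emit pass.

-- dict.get k / dict.get k dflt on an email/classification dict (association list)
def dget? (d : List (String × String)) (k : String) : Option String := (PySem.Dict.mk d).get? k
def dgetD (d : List (String × String)) (k dflt : String) : String := (PySem.Dict.mk d).getD k dflt

-- ===== PORT A =====
def get_deferred_digest (deferred_emails : List (List (String × String))) (classifications : List (List (String × String))) : String :=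
  if deferred_emails.isEmpty then "No deferred emails." else
  -- "=" * 60 rendered as the 60-char literal; f-string as concatenation (exact on this domain)
  let lines : List String := ["DEFERRED EMAIL DIGEST (" ++ PySem.Int.toStr (deferred_emails.length : Int) ++ " emails)\n" ++ String.ofList (List.replicate 60 '=')]
  let lines := (["P3", "P2", "P1"] : List String).foldl (fun lines priority =>
    let matching : List ((List (String × String)) × (List (String × String))) :=
      deferred_emails.foldl (fun matching email =>
        -- next((c for c in classifications if …), {"priority": "P3"})
        let classification := (classifications.find? (fun c => dget? c "message_id" == dget? email "id")).getD [("priority", "P3")]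
        if dget? classification "priority" == some priority then matching ++ [(email, classification)] else matching) []
    if matching.isEmpty then lines else
      let lines := lines ++ ["\n" ++ priority ++ ":"]
      matching.foldl (fun lines ec =>
        let sender := dgetD ec.1 "sender_name" (dgetD ec.1 "sender_email" "Unknown")
        let subject := PySem.Str.slice (dgetD ec.1 "subject" "[No subject]") none (some 50)
        let summary := PySem.Str.slice (dgetD ec.2 "summary" "") none (some 60)
        let lines := lines ++ ["  • " ++ sender ++ ": " ++ subject]
        if summary ≠ "" then lines ++ ["    → " ++ summary] else lines) lines) lines
  PySem.Str.join "\n" lines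

-- ===== PORT B =====
def get_deferred_digest_alt (deferred_emails : List (List (String × String))) (classifications : List (List (String × String))) : String :=
  if deferred_emails.isEmpty then "No deferred emails." else
  -- index = {}; for c in classifications: index.setdefault(c.get("message_id"), c)
  let index : PySem.Dict (Option String) (List (String × String)) :=
    classifications.foldl (fun d c => d.setdefault (dget? c "message_id") c) PySem.Dict.empty
  -- buckets = {}; …; buckets.setdefault(c.get("priority"), []).append((email, c))
  let buckets : PySem.Dict (Option String) (List ((List (String × String)) × (List (String × String)))) :=
    deferred_emails.foldl (fun buckets email =>
      let c := index.getD (dget? email "id") [("priority", "P3")]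
      buckets.modify (dget? c "priority") [] (fun g => g ++ [(email, c)])) PySem.Dict.empty
  let lines : List String := ["DEFERRED EMAIL DIGEST (" ++ PySem.Int.toStr (deferred_emails.length : Int) ++ " emails)\n" ++ String.ofList (List.replicate 60 '=')]
  let lines := (["P3", "P2", "P1"] : List String).foldl (fun lines priority =>
    let group := buckets.getD (some priority) []
    if group.isEmpty then lines else
      let lines := lines ++ ["\n" ++ priority ++ ":"]
      group.foldl (fun lines ec =>
        let sender := dgetD ec.1 "sender_name" (dgetD ec.1 "sender_email" "Unknown")
        let subject := PySem.Str.slice (dgetD ec.1 "subject" "[No subject]") none (some 50)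
        let summary := PySem.Str.slice (dgetD ec.2 "summary" "") none (some 60)
        let lines := lines ++ ["  • " ++ sender ++ ": " ++ subject]
        if summary ≠ "" then lines ++ ["    → " ++ summary] else lines) lines) lines
  PySem.Str.join "\n" lines

-- ===== PRECONDITION & SPEC =====
def Spec_get_deferred_digest (deferred_emails : List (List (String × String))) (classifications : List (List (String × String))) (out : String) : Prop := out = get_deferred_digest_alt deferred_emails classifications
instance (deferred_emails : List (List (String × String))) (classifications : List (List (String × String))) (out : String) : Decidable (Spec_get_deferred_digest deferred_emails classifications out) := by unfold Spec_get_deferred_digest; infer_instance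

-- ===== CLAIM (what is proved, stated in full; the proofs are below) =====
def Claim_equal_get_deferred_digest : Prop := ∀ (deferred_emails : List (List (String × String))) (classifications : List (List (String × String))), Dom_get_deferred_digest deferred_emails classifications → Spec_get_deferred_digest deferred_emails classifications (get_deferred_digest deferred_emails classifications)

-- ===== LEMMAS AND PROOFS =====

-- A's per-email resolver: first classification whose message_id equals the email's id, default P3
def resA (classifications : List (List (String × String))) (email : List (String × String)) : List (String × String) :=
  (classifications.find? (fun c => dget? c "message_id" == dget? email "id")).getD [("priority", "P3")]

-- the emails of priority p, each paired with its resolved classification, in original order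
def sel (classifications : List (List (String × String))) (deferred_emails : List (List (String × String))) (p : String) : List ((List (String × String)) × (List (String × String))) :=
  (deferred_emails.filter (fun e => dget? (resA classifications e) "priority" == some p)).map (fun e => (e, resA classifications e))

-- the setdefault-index realises first-match lookup
lemma index_get? (classifications : List (List (String × String))) :
    ∀ (d : PySem.Dict (Option String) (List (String × String))) (k : Option String),
      (classifications.foldl (fun d c => d.setdefault (dget? c "message_id") c) d).get? k
        = (d.get? k).or (classifications.find? (fun c => dget? c "message_id" == k)) := by
  induction classifications with
  | nil => intro d k; simp
  | cons c cl ih =>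
    intro d k
    rw [List.foldl_cons, ih]
    by_cases h : k = dget? c "message_id"
    · subst h
      have hpc : (fun c1 => dget? c1 "message_id" == dget? c "message_id") c = true := beq_self_eq_true _
      rw [PySem.Dict.get?_setdefault_self, List.find?_cons_of_pos (p := fun c1 => dget? c1 "message_id" == dget? c "message_id") hpc]
      cases hdk : d.get? (dget? c "message_id") <;> rfl
    · rw [PySem.Dict.get?_setdefault_of_ne _ _ h,
        List.find?_cons_of_neg (by simp only [beq_iff_eq]; exact fun hh => h hh.symm)]

-- B's resolver equals A's
lemma res_eq (classifications : List (List (String × String))) (email : List (String × String)) :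
    (classifications.foldl (fun d c => d.setdefault (dget? c "message_id") c) PySem.Dict.empty).getD
        (dget? email "id") [("priority", "P3")] = resA classifications email := by
  rw [PySem.Dict.getD_eq_get?_getD, index_get?]
  rfl

-- the bucketing fold collects, per key, exactly that key's emails in order (for any resolver res)
lemma bucket_fold (res : List (String × String) → List (String × String)) (de : List (List (String × String))) :
    ∀ (b : PySem.Dict (Option String) (List ((List (String × String)) × (List (String × String))))) (k : Option String),
      (de.foldl (fun buckets email =>
          buckets.modify (dget? (res email) "priority") [] (fun g => g ++ [(email, res email)])) b).getD k []
        = b.getD k [] ++ (de.filter (fun e => dget? (res e) "priority" == k)).map (fun e => (e, res e)) := by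
  induction de with
  | nil => intro b k; simp
  | cons e de ih =>
    intro b k
    simp only [List.foldl_cons, List.filter_cons]
    rw [ih, PySem.Dict.getD_modify]
    by_cases h : k = dget? (res e) "priority"
    · subst h
      simp [List.append_assoc]
    · have hb : (dget? (res e) "priority" == k) = false := by
        simp only [beq_eq_false_iff_ne, ne_eq]
        exact fun hh => h hh.symm
      simp [h, hb]

-- A's matching list for priority p is exactly sel
lemma matching_eq (classifications de : List (List (String × String))) (p : String) :
    (de.foldl (fun matching email =>
        let classification := (classifications.find? (fun c => dget? c "message_id" == dget? email "id")).getD [("priority", "P3")]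
        if dget? classification "priority" == some p then matching ++ [(email, classification)] else matching) [])
      = sel classifications de p :=
  PySem.List.foldl_append_if
    (fun e => dget? (resA classifications e) "priority" == some p)
    (fun e => (e, resA classifications e)) de []

-- B's bucket for priority p is exactly sel
lemma bucket_eq (cl de : List (List (String × String))) (p : String) :
    (de.foldl (fun buckets email =>
        let c := (cl.foldl (fun d c => d.setdefault (dget? c "message_id") c) PySem.Dict.empty).getD (dget? email "id") [("priority", "P3")]
        buckets.modify (dget? c "priority") [] (fun g => g ++ [(email, c)])) PySem.Dict.empty).getD (some p) []
      = sel cl de p := by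
  have hb := bucket_fold
      (fun email => (cl.foldl (fun d c => d.setdefault (dget? c "message_id") c) PySem.Dict.empty).getD (dget? email "id") [("priority", "P3")])
      de PySem.Dict.empty (some p)
  rw [hb, PySem.Dict.getD_empty, List.nil_append]
  simp only [sel, res_eq]

theorem main_eq (de cl : List (List (String × String))) :
    get_deferred_digest de cl = get_deferred_digest_alt de cl := by
  unfold get_deferred_digest get_deferred_digest_alt
  by_cases he : de.isEmpty = true
  · rw [if_pos he, if_pos he]
  · rw [if_neg he, if_neg he]
    refine congrArg (PySem.Str.join "\n") ?_
    apply PySem.List.foldl_congr_mem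
    intro lines p hp
    rw [matching_eq cl de p, bucket_eq cl de p]

-- ===== VERDICT (by name: the statement is the Claim_ definition above) =====
theorem get_deferred_digest_spec : Claim_equal_get_deferred_digest := by
  intro de cl _
  show get_deferred_digest de cl = get_deferred_digest_alt de cl
  exact main_eq de cl
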